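-- pv_equiv track=rewrite | github.com/BenjaSchindler/tesis | experiments/generate_visualizations.py | get_dataset_base
-- ===== SOURCE A (Python) =====
-- def get_dataset_base(dataset_name):
--     bases = sorted([
--         "sms_spam", "hate_speech_davidson", "20newsgroups_20class",
--         "20newsgroups", "ag_news", "emotion", "dbpedia14",
--     ], key=len, reverse=True)
--     for base in bases:
--         if dataset_name.startswith(base + "_"):
--             return base
--     return dataset_name
-- ===== SOURCE B (Python) =====
-- def get_dataset_base(dataset_name):
--     bases = [
--         "sms_spam", "hate_speech_davidson", "20newsgroups_20class",
--         "20newsgroups", "ag_news", "emotion", "dbpedia14",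
--     ]
--     matches = [b for b in bases if dataset_name.startswith(b + "_")]
--     return max(matches, key=len) if matches else dataset_name
-- ===== Notes on version B (the rewrite author's own statement) =====
-- stated objective: simpler
-- what changed: Drops the length-sort entirely: B collects all bases whose underscored form prefixes the name in original list order and returns the longest match via max(key=len), instead of sorting by descending length and returning the first match.
import Mathlib
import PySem

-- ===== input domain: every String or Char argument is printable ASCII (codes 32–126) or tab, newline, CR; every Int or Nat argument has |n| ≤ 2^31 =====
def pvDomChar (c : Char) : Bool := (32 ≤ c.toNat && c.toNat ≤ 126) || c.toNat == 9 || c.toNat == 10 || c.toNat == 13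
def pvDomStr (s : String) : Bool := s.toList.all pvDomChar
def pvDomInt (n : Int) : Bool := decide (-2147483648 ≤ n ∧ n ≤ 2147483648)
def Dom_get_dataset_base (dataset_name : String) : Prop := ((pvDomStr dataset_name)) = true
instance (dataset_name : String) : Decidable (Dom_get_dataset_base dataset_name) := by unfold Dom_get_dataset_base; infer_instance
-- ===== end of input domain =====

-- B drops the pre-sort: it collects all matching bases in original order and returns the longest ('simpler').

-- ===== PORT A =====
def pvFirstMatch (dataset_name : String) : List String → String
  | [] => dataset_name
  | b :: rest =>
      if PySem.Str.startswith dataset_name (b ++ "_") then b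
      else pvFirstMatch dataset_name rest

def get_dataset_base (dataset_name : String) : String :=
  let bases := PySem.List.sorted
    ["sms_spam", "hate_speech_davidson", "20newsgroups_20class",
     "20newsgroups", "ag_news", "emotion", "dbpedia14"]
    (fun b => PySem.Str.len b) true
  pvFirstMatch dataset_name bases

-- ===== PORT B =====
def get_dataset_base_alt (dataset_name : String) : String :=
  let bases := ["sms_spam", "hate_speech_davidson", "20newsgroups_20class",
                "20newsgroups", "ag_news", "emotion", "dbpedia14"]
  let hits := bases.filter (fun b => PySem.Str.startswith dataset_name (b ++ "_"))
  match PySem.List.max? hits (fun b => PySem.Str.len b) with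
  | some m => m
  | none => dataset_name

-- ===== PRECONDITION & SPEC =====
def Spec_get_dataset_base (dataset_name : String) (out : String) : Prop := out = get_dataset_base_alt dataset_name
instance (dataset_name : String) (out : String) : Decidable (Spec_get_dataset_base dataset_name out) := by unfold Spec_get_dataset_base; infer_instance

-- ===== CLAIM (what is proved, stated in full; the proofs are below) =====
def Claim_equal_get_dataset_base : Prop := ∀ (dataset_name : String), Dom_get_dataset_base dataset_name → Spec_get_dataset_base dataset_name (get_dataset_base dataset_name)

-- ===== LEMMAS AND PROOFS =====

-- a string starting with "20newsgroups_20class_" also starts with "20newsgroups_"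
lemma pv_sw_trans (s : String)
    (h : PySem.Str.startswith s "20newsgroups_20class_" = true) :
    PySem.Str.startswith s "20newsgroups_" = true := by
  simp only [PySem.Str.startswith_eq, PySem.Chars.startswith_iff] at h ⊢
  exact List.IsPrefix.trans (by decide) h

set_option maxHeartbeats 1000000 in
lemma pv_sorted_bases :
    PySem.List.sorted
      ["sms_spam", "hate_speech_davidson", "20newsgroups_20class",
       "20newsgroups", "ag_news", "emotion", "dbpedia14"]
      (fun b => PySem.Str.len b) true
    = ["hate_speech_davidson", "20newsgroups_20class", "20newsgroups",
       "dbpedia14", "sms_spam", "ag_news", "emotion"] := by decide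

-- ===== VERDICT (by name: the statement is the Claim_ definition above) =====
set_option maxHeartbeats 4000000 in
theorem get_dataset_base_spec : Claim_equal_get_dataset_base := by
  intro s _
  unfold Spec_get_dataset_base get_dataset_base get_dataset_base_alt
  simp only [pv_sorted_bases]
  by_cases h1 : PySem.Str.startswith s "sms_spam_" = true <;>
  by_cases h2 : PySem.Str.startswith s "hate_speech_davidson_" = true <;>
  by_cases h3 : PySem.Str.startswith s "20newsgroups_20class_" = true <;>
  by_cases h4 : PySem.Str.startswith s "20newsgroups_" = true <;>
  by_cases h5 : PySem.Str.startswith s "ag_news_" = true <;>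
  by_cases h6 : PySem.Str.startswith s "emotion_" = true <;>
  by_cases h7 : PySem.Str.startswith s "dbpedia14_" = true <;>
  first
    | (exact absurd (pv_sw_trans s h3) h4)
    | ((simp_all [pvFirstMatch]) <;> rfl)
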